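-- pv_equiv track=rewrite | github.com/morino-kumasan/comfyui-toml-prompt | toml_prompt/inner/prompt.py | build_search_keys
-- ===== SOURCE A (Python) =====
-- import functools
--
-- def build_search_keys(
--     keys: str | list[list[str]], prefix: list[str] | None = None
-- ) -> list[str]:
--     if prefix is None:
--         prefix = []
--     if isinstance(keys, str):
--         keys = [(key.split("+")) for key in keys.split(".")]
--     key_len = len(keys)
--     if key_len == 1:
--         # 終端の*, ?を区別できるように変換
--         return [
--             ".".join(prefix + [key + "$" if key in ["?", "*"] else key])
--             for key in keys[0]
--         ]
--     elif key_len == 0: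
--         return []
--     return functools.reduce(
--         lambda x, y: x + y,
--         [
--             [".".join(prefix + [key])] + build_search_keys(keys[1:], prefix + [key])
--             for key in keys[0]
--         ],
--     )
-- ===== SOURCE B (Python) =====
-- def build_search_keys(keys, prefix=None):
--     if prefix is None:
--         prefix = []
--     if isinstance(keys, str):
--         keys = [key.split("+") for key in keys.split(".")]
--     acc = None
--     for group in reversed(keys):
--         if acc is None:
--             acc = [k + "$" if k in ("?", "*") else k for k in group]
--         else:
--             acc = [s for k in group for s in [k] + [k + "." + t for t in acc]]
--     res = acc if acc is not None else []
--     if prefix: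
--         head = ".".join(prefix)
--         res = [head + "." + s for s in res]
--     return res
-- ===== Notes on version B (the rewrite author's own statement) =====
-- stated objective: alternative
-- what changed: Replaces A's top-down recursion (prefix list threaded into every call, per-key sublists concatenated via functools.reduce) with a single bottom-up pass over the groups in reverse, building relative suffix expansions by string concatenation and attaching the joined prefix once at the end.
import Mathlib
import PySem

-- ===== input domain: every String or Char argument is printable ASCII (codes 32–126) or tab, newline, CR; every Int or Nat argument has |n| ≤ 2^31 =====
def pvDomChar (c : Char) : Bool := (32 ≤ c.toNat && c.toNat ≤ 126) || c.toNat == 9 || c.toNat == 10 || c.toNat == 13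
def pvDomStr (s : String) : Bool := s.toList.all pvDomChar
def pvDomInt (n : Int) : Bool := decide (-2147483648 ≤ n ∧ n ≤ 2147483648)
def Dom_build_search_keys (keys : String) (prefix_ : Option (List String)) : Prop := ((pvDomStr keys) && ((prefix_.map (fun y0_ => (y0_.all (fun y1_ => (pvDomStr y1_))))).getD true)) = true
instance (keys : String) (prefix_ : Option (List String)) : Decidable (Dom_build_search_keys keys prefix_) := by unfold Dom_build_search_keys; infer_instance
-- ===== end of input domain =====

-- B replaces A's top-down recursion (prefix threaded through each call, per-key results
-- concatenated by functools.reduce) with a single bottom-up pass over the groups in reverse,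
-- building the suffix expansions once and attaching the joined prefix at the end (objective:
-- alternative decomposition, same cost).

-- ===== PORT A =====
-- A's recursion on the list-of-groups form (the branch taken after the string is parsed);
-- strings are carried as List Char (PySem.Chars) and packed back at the end.
def pvReduceConcat : List (List (List Char)) → List (List Char)
  | [] => []
  | h :: t => t.foldl (· ++ ·) h   -- functools.reduce(lambda x, y: x + y, …)

def pvBskRec : List (List (List Char)) → List (List Char) → List (List Char)
  | [g], pfx =>
      -- key_len == 1: terminal group, '?'/'*' get a '$' suffix
      g.map (fun key =>
        PySem.Chars.join ['.'] (pfx ++ [if key ∈ [['?'], ['*']] then key ++ ['$'] else key]))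
  | [], _ => []   -- key_len == 0
  | g :: rest, pfx =>
      pvReduceConcat
        (g.map (fun key =>
          PySem.Chars.join ['.'] (pfx ++ [key]) :: pvBskRec rest (pfx ++ [key])))

def build_search_keys (keys : String) (prefix_ : Option (List String)) : List String :=
  let pfx := (prefix_.getD []).map String.toList
  let groups := (PySem.Chars.splitOn keys.toList ['.']).map (fun k => PySem.Chars.splitOn k ['+'])
  (pvBskRec groups pfx).map (fun cs => String.ofList cs)

-- ===== PORT B =====
def pvConv (k : List Char) : List Char := if k = ['?'] || k = ['*'] then k ++ ['$'] else k

-- one step of Source B's 'for group in reversed(keys)' loop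
def pvStep (acc : Option (List (List Char))) (g : List (List Char)) : Option (List (List Char)) :=
  match acc with
  | none => some (g.map pvConv)
  | some a => some (g.flatMap (fun k => k :: a.map (fun t => k ++ '.' :: t)))

def build_search_keys_alt (keys : String) (prefix_ : Option (List String)) : List String :=
  let pfx := (prefix_.getD []).map String.toList
  let groups := (PySem.Chars.splitOn keys.toList ['.']).map (fun k => PySem.Chars.splitOn k ['+'])
  let res := (groups.reverse.foldl pvStep none).getD []
  let out := if pfx.isEmpty then res
             else res.map (fun s => PySem.Chars.join ['.'] pfx ++ '.' :: s)
  out.map (fun cs => String.ofList cs)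

-- ===== PRECONDITION & SPEC =====
def Spec_build_search_keys (keys : String) (prefix_ : Option (List String)) (out : List String) : Prop := out = build_search_keys_alt keys prefix_
instance (keys : String) (prefix_ : Option (List String)) (out : List String) : Decidable (Spec_build_search_keys keys prefix_ out) := by unfold Spec_build_search_keys; infer_instance

-- ===== CLAIM (what is proved, stated in full; the proofs are below) =====
def Claim_equal_build_search_keys : Prop := ∀ (keys : String) (prefix_ : Option (List String)), Dom_build_search_keys keys prefix_ → Spec_build_search_keys keys prefix_ (build_search_keys keys prefix_)

-- ===== LEMMAS AND PROOFS =====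

-- attach prefix the way B does it (identity on an empty prefix)
def pvApplyPfx (pfx : List (List Char)) (l : List (List Char)) : List (List Char) :=
  if pfx.isEmpty then l else l.map (fun s => PySem.Chars.join ['.'] pfx ++ '.' :: s)

-- B's loop over reversed(groups), as a foldr
def pvR (groups : List (List (List Char))) : Option (List (List Char)) :=
  groups.foldr (fun g acc => pvStep acc g) none

theorem pvR_eq_foldl (groups : List (List (List Char))) :
    groups.reverse.foldl pvStep none = pvR groups := by
  simp [pvR, List.foldl_reverse]

theorem pv_join_snoc (pfx : List (List Char)) (x : List Char) :
    PySem.Chars.join ['.'] (pfx ++ [x]) =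
      if pfx.isEmpty then x else PySem.Chars.join ['.'] pfx ++ '.' :: x := by
  induction pfx with
  | nil => simp [PySem.Chars.join_singleton]
  | cons p ps ih =>
    cases ps with
    | nil => simp [PySem.Chars.join_cons_cons, PySem.Chars.join_singleton]
    | cons q qs =>
      have h2 : PySem.Chars.join ['.'] (q :: qs ++ [x]) =
          PySem.Chars.join ['.'] (q :: qs) ++ '.' :: x := by
        rw [ih]; simp
      simp only [List.cons_append] at h2 ⊢
      rw [PySem.Chars.join_cons_cons, h2]
      simp [PySem.Chars.join_cons_cons, List.append_assoc]

theorem pvReduceConcat_eq_flatten (l : List (List (List Char))) :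
    pvReduceConcat l = l.flatten := by
  cases l with
  | nil => rfl
  | cons h t =>
    show t.foldl (· ++ ·) h = (h :: t).flatten
    induction t generalizing h with
    | nil => simp
    | cons a t ih => simp [List.foldl, ih, List.append_assoc]

theorem pvStep_isSome (acc : Option (List (List Char))) (g : List (List Char)) :
    ∃ a, pvStep acc g = some a := by
  cases acc <;> simp [pvStep]

theorem pv_main (groups : List (List (List Char))) (pfx : List (List Char)) :
    pvBskRec groups pfx = pvApplyPfx pfx ((pvR groups).getD []) := by
  induction groups generalizing pfx with
  | nil => simp [pvBskRec, pvR, pvApplyPfx]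
  | cons g rest ih =>
    cases rest with
    | nil =>
      simp only [pvBskRec, pvR, List.foldr, pvStep, Option.getD_some, pvApplyPfx]
      by_cases hp : pfx.isEmpty
      · simp only [hp, if_true]
        refine List.map_congr_left (fun k _ => ?_)
        have : pfx = [] := List.isEmpty_iff.mp hp
        subst this
        simp [pvConv, PySem.Chars.join_singleton]
      · simp only [hp, List.map_map]
        refine List.map_congr_left (fun k _ => ?_)
        simp only [Function.comp, pvConv]
        rw [pv_join_snoc]
        simp only [hp]
        by_cases h1 : k = ['?'] <;> by_cases h2 : k = ['*'] <;> simp [h1, h2]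
    | cons r rs =>
      obtain ⟨a, ha⟩ := pvStep_isSome (pvR rs) r
      have hR : pvR (r :: rs) = some a := ha
      have hRa : pvR (g :: r :: rs) = pvStep (some a) g := by
        simp [pvR] at hR ⊢; rw [hR]
      simp only [pvBskRec, pvReduceConcat_eq_flatten, hRa, pvStep, Option.getD_some]
      rw [← List.flatMap_def]
      by_cases hp : pfx.isEmpty
      · have hpfx : pfx = [] := List.isEmpty_iff.mp hp
        subst hpfx
        simp only [pvApplyPfx, List.isEmpty_nil, if_true]
        refine List.flatMap_congr (fun k _ => ?_)
        rw [ih, pv_join_snoc]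
        simp [pvApplyPfx, hR, PySem.Chars.join_singleton]
      · simp only [pvApplyPfx, hp, List.map_flatMap]
        refine List.flatMap_congr (fun k _ => ?_)
        rw [ih, pv_join_snoc]
        simp only [hp, pvApplyPfx, hR, Option.getD_some]
        by_cases hk : (pfx ++ [k]).isEmpty
        · simp at hk
        · simp only [hk, List.map_cons, List.map_map]
          rw [pv_join_snoc]
          simp only [hp]
          congr 1
          refine List.map_congr_left (fun t _ => ?_)
          simp [List.append_assoc]

-- ===== VERDICT (by name: the statement is the Claim_ definition above) =====
theorem build_search_keys_spec : Claim_equal_build_search_keys := by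
  intro keys prefix_ _
  show build_search_keys keys prefix_ = build_search_keys_alt keys prefix_
  simp only [build_search_keys, build_search_keys_alt, pvR_eq_foldl, pv_main, pvApplyPfx]
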